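-- pv_equiv track=rewrite | github.com/Salome2010/IntroProgramacion | recu.py | longitud_mas_grande
-- ===== SOURCE A (Python) =====
-- def longitud_mas_grande(A:[[int]]) -> int:
--     longitudMax:int = 0
--     for i in range(len(A)):
--         if longitudUnosMax(A[i]) > longitudMax:
--             longitudMax = longitudUnosMax(A[i])
--         else:
--             longitudMax
--     return longitudMax
--
-- def longitudUnosMax(lista:[int]) -> int:
--     longitud:int = 0
--     longitudMax:int = 0
--     indice:int = 0
--     for i in range(len(lista)):
--         if lista[i] == 1:
--             if longitud==0:
--                 indice=i
--             longitud+=1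
--             if longitud > longitudMax:
--                 longitudMax = longitud
--         else:
--             longitud = 0
--     return longitudMax
-- ===== SOURCE B (Python) =====
-- def longitud_mas_grande(A):
--     best = 0
--     for row in A:
--         n = len(row)
--         i = 0
--         while i < n:
--             j = i + 1
--             while j < n and row[j] == row[i]:
--                 j += 1
--             if row[i] == 1 and j - i > best:
--                 best = j - i
--             i = j
--     return best
-- ===== Notes on version B (the rewrite author's own statement) =====
-- stated objective: alternative
-- what changed: Replaces the per-row counter-with-reset state machine (helper longitudUnosMax plus an outer max loop) by a single two-pointer run scanner that jumps from run boundary to run boundary and threads one global best through all rows.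
import Mathlib
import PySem

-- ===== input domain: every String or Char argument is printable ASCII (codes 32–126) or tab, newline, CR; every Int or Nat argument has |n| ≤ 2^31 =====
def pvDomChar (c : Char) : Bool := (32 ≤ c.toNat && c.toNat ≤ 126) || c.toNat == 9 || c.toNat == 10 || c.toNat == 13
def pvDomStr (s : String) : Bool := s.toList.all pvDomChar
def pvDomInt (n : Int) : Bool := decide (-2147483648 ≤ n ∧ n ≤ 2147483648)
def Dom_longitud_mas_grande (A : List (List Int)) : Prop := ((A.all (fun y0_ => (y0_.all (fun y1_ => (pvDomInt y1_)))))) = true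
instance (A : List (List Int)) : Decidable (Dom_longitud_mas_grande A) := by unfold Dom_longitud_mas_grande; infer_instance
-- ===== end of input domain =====

-- B replaces A's counter-with-reset state machine (helper longitudUnosMax + outer max loop)
-- by a single two-pointer run scanner threading one global best through all rows (objective: alternative).

-- ===== PORT A =====
-- step of the 'for i in range(len(lista))' loop of longitudUnosMax; state = (longitud, longitudMax, indice)
def pvPasoA (st : Int × Int × Int) (p : Int × Int) : Int × Int × Int :=
  if p.2 == 1 then
    let indice := if st.1 == 0 then p.1 else st.2.2
    let longitud := st.1 + 1
    let longitudMax := if longitud > st.2.1 then longitud else st.2.1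
    (longitud, longitudMax, indice)
  else (0, st.2.1, st.2.2)

def longitudUnosMax (lista : List Int) : Int :=
  ((PySem.List.enumerate lista).foldl pvPasoA (0, 0, 0)).2.1

def longitud_mas_grande (A : List (List Int)) : Int :=
  A.foldl (fun longitudMax fila =>
    if longitudUnosMax fila > longitudMax then longitudUnosMax fila else longitudMax) 0

-- ===== PORT B =====
-- inner 'while j < n and row[j] == row[i]' loop; row.getD j 0 is exact: only read when j < n
def pvBInner (row : List Int) (n : Nat) (x : Int) (j : Nat) : Nat :=
  if _h : j < n then
    if row.getD j 0 == x then pvBInner row n x (j + 1) else j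
  else j
termination_by n - j

theorem pvBInner_ge (row : List Int) (n : Nat) (x : Int) (j : Nat) : j ≤ pvBInner row n x j := by
  unfold pvBInner
  split
  · split
    · exact le_trans (Nat.le_succ j) (pvBInner_ge row n x (j + 1))
    · exact le_refl j
  · exact le_refl j
termination_by n - j

-- outer 'while i < n' loop of B, threading the global best
def pvBOuter (row : List Int) (n : Nat) (i : Nat) (best : Int) : Int :=
  if _h : i < n then
    let j := pvBInner row n (row.getD i 0) (i + 1)
    pvBOuter row n j
      (if row.getD i 0 == 1 && decide ((j : Int) - (i : Int) > best) then (j : Int) - (i : Int) else best)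
  else best
termination_by n - i
decreasing_by
  have := pvBInner_ge row n (row.getD i 0) (i + 1)
  omega

def longitud_mas_grande_alt (A : List (List Int)) : Int :=
  A.foldl (fun best row => pvBOuter row row.length 0 best) 0

-- ===== PRECONDITION & SPEC =====
def Spec_longitud_mas_grande (A : List (List Int)) (out : Int) : Prop := out = longitud_mas_grande_alt A
instance (A : List (List Int)) (out : Int) : Decidable (Spec_longitud_mas_grande A out) := by unfold Spec_longitud_mas_grande; infer_instance

-- ===== CLAIM (what is proved, stated in full; the proofs are below) =====
def Claim_equal_longitud_mas_grande : Prop := ∀ (A : List (List Int)), Dom_longitud_mas_grande A → Spec_longitud_mas_grande A (longitud_mas_grande A)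

-- ===== LEMMAS AND PROOFS =====

-- reference state machine: A's inner loop with the dead 'indice' component removed
def mAux (cur maxv : Int) : List Int → Int
  | [] => maxv
  | x :: xs =>
      if x = 1 then mAux (cur + 1) (if cur + 1 > maxv then cur + 1 else maxv) xs
      else mAux 0 maxv xs

theorem foldl_pvPasoA (l : List Int) (s cur maxv ind : Int) :
    ((PySem.List.enumerate l s).foldl pvPasoA (cur, maxv, ind)).2.1 = mAux cur maxv l := by
  induction l generalizing s cur maxv ind with
  | nil => simp [PySem.List.enumerate_nil, mAux]
  | cons x xs ih =>
      rw [PySem.List.enumerate_cons]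
      simp only [List.foldl_cons, pvPasoA, mAux]
      by_cases hx : x = 1
      · simp [hx, ih]
      · simp [hx, ih]

theorem longitudUnosMax_eq (l : List Int) : longitudUnosMax l = mAux 0 0 l := by
  unfold longitudUnosMax; exact foldl_pvPasoA l 0 0 0 0

theorem pvBInner_eq (row : List Int) (x : Int) (j : Nat) :
    pvBInner row row.length x j = j + ((row.drop j).takeWhile (· == x)).length := by
  unfold pvBInner
  by_cases h : j < row.length
  · have hg : row.getD j 0 = row[j] := List.getD_eq_getElem row 0 h
    rw [List.drop_eq_getElem_cons h]
    by_cases hx : row.getD j 0 == x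
    · rw [dif_pos h, if_pos hx, pvBInner_eq row x (j + 1), List.takeWhile_cons, ← hg, hx,
        if_pos rfl, List.length_cons]
      omega
    · rw [dif_pos h, if_neg hx, List.takeWhile_cons, ← hg]
      simp only [Bool.not_eq_true] at hx
      rw [hx]
      simp
  · rw [dif_neg h, List.drop_eq_nil_of_le (by omega)]
    simp
termination_by row.length - j

-- B's per-row scan, expressed structurally on the remaining suffix
def bAux (best : Int) : List Int → Int
  | [] => best
  | x :: xs =>
      bAux (if x = 1 ∧ (1 + ((xs.takeWhile (· == x)).length : Int) > best)
            then 1 + ((xs.takeWhile (· == x)).length : Int) else best)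
        (xs.drop (xs.takeWhile (· == x)).length)
termination_by l => l.length
decreasing_by
  have := List.length_drop (l := xs) (i := (xs.takeWhile (· == x)).length)
  simp only [List.length_cons]
  omega

theorem pvBOuter_eq (row : List Int) (i : Nat) (best : Int) :
    pvBOuter row row.length i best = bAux best (row.drop i) := by
  unfold pvBOuter
  by_cases h : i < row.length
  · rw [dif_pos h]
    have hg : row.getD i 0 = row[i] := List.getD_eq_getElem row 0 h
    have hdrop : row.drop i = row[i] :: row.drop (i + 1) := List.drop_eq_getElem_cons h
    set x := row[i] with hx
    have hin : pvBInner row row.length (row.getD i 0) (i + 1)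
        = (i + 1) + ((row.drop (i + 1)).takeWhile (· == x)).length := by
      rw [hg, pvBInner_eq]
    set t := ((row.drop (i + 1)).takeWhile (· == x)).length with ht
    rw [hin, pvBOuter_eq row ((i + 1) + t)]
    rw [hdrop]
    conv_rhs => rw [bAux.eq_2]
    have hdd : row.drop ((i + 1) + t) = (row.drop (i + 1)).drop t := by
      rw [List.drop_drop]
    rw [hdd]
    congr 1
    have hcast : ((((i + 1) + t : Nat) : Int) - (i : Int)) = 1 + (t : Int) := by push_cast; try ring
    rw [hg, hcast]
    simp only [Bool.and_eq_true, beq_iff_eq, decide_eq_true_eq]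
    rw [← ht]
  · rw [dif_neg h, List.drop_eq_nil_of_le (by omega), bAux]
termination_by row.length - i
decreasing_by
  have := pvBInner_ge row row.length (row.getD i 0) (i + 1)
  omega

-- mAux skips a prefix containing no 1s
theorem mAux_skip (pre rest : List Int) (maxv : Int) (hp : ∀ a ∈ pre, a ≠ 1) :
    mAux 0 maxv (pre ++ rest) = mAux 0 maxv rest := by
  induction pre with
  | nil => rfl
  | cons a as ih =>
      have ha : a ≠ 1 := hp a (List.mem_cons_self)
      simp only [List.cons_append, mAux, if_neg ha]
      exact ih (fun b hb => hp b (List.mem_cons_of_mem a hb))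

-- mAux consumes a run of m ones
theorem mAux_ones (m : Nat) (rest : List Int) (cur maxv : Int) (h : cur ≤ maxv) :
    mAux cur maxv (List.replicate m 1 ++ rest)
      = mAux (cur + m) (if cur + m > maxv then cur + m else maxv) rest := by
  induction m generalizing cur maxv with
  | zero =>
      simp only [List.replicate_zero, List.nil_append, Nat.cast_zero, add_zero]
      rw [if_neg (by omega)]
  | succ k ih =>
      rw [List.replicate_succ, List.cons_append]
      simp only [mAux]
      rw [ih (cur + 1) _ (by split <;> omega)]
      have e1 : cur + 1 + (k : Int) = cur + ((k + 1 : Nat) : Int) := by push_cast; ring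
      rw [e1]
      have e2 : (if cur + ((k + 1 : Nat) : Int) > (if cur + 1 > maxv then cur + 1 else maxv)
          then cur + ((k + 1 : Nat) : Int) else (if cur + 1 > maxv then cur + 1 else maxv))
          = (if cur + ((k + 1 : Nat) : Int) > maxv then cur + ((k + 1 : Nat) : Int) else maxv) := by
        push_cast; split_ifs <;> omega
      rw [e2, if_pos trivial]

-- a leading non-1 (or empty rest) lets mAux forget cur
theorem mAux_reset (rest : List Int) (cur maxv : Int)
    (h : ∀ y ∈ rest.head?, y ≠ 1) : mAux cur maxv rest = mAux 0 maxv rest := by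
  cases rest with
  | nil => rfl
  | cons y r =>
      have hy : y ≠ 1 := h y (by simp)
      simp [mAux, if_neg hy]

theorem mAux_ge (l : List Int) (cur maxv : Int) : maxv ≤ mAux cur maxv l := by
  induction l generalizing cur maxv with
  | nil => exact le_refl _
  | cons x xs ih =>
      simp only [mAux]
      split
      · exact le_trans (by split <;> omega) (ih _ _)
      · exact ih _ _

theorem head?_dropWhile_ne (p : Int → Bool) (l : List Int) :
    ∀ y ∈ (l.dropWhile p).head?, p y = false := by
  intro y hy
  cases hl : l.dropWhile p with
  | nil => rw [hl] at hy; simp at hy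
  | cons a as =>
      rw [hl] at hy
      simp only [List.head?_cons, Option.mem_def, Option.some.injEq] at hy
      subst hy
      have := List.dropWhile_get_zero_not p l (by rw [hl]; simp)
      simpa [hl] using this

theorem bAux_eq_mAux : ∀ (l : List Int) (best : Int), 0 ≤ best → bAux best l = mAux 0 best l
  | [], best, _ => by rw [bAux.eq_1]; rfl
  | x :: xs, best, h => by
      rw [bAux.eq_2]
      set t := (xs.takeWhile (· == x)).length with ht
      have hsplit : xs.takeWhile (· == x) ++ xs.dropWhile (· == x) = xs :=
        List.takeWhile_append_dropWhile
      have hdrop : xs.drop t = xs.dropWhile (· == x) := by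
        conv_lhs => rw [← hsplit]
        rw [ht, List.drop_left]
      have hrec : bAux (if x = 1 ∧ (1 + (t : Int) > best) then 1 + (t : Int) else best) (xs.drop t)
          = mAux 0 (if x = 1 ∧ (1 + (t : Int) > best) then 1 + (t : Int) else best) (xs.drop t) :=
        bAux_eq_mAux (xs.drop t) _ (by split_ifs with h' <;> [omega; exact h])
      rw [hrec]
      by_cases h1 : x = 1
      · -- leading run of 1 + t ones
        subst h1
        have hrepl : (xs.takeWhile (· == (1 : Int))) = List.replicate t 1 := by
          apply List.eq_replicate_of_mem
          intro b hb
          have := List.mem_takeWhile_imp hb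
          simpa using this
        have hl : (1 : Int) :: xs = List.replicate (1 + t) 1 ++ xs.dropWhile (· == (1 : Int)) := by
          rw [add_comm, List.replicate_succ, List.cons_append]
          congr 1
          conv_lhs => rw [← hsplit, hrepl]
        conv_rhs => rw [hl]
        rw [mAux_ones (1 + t) _ 0 best h, hdrop]
        conv_rhs => rw [mAux_reset _ _ _ (by
          intro y hy
          have := head?_dropWhile_ne (· == (1 : Int)) xs y hy
          simpa using this)]
        congr 1
        simp only [true_and, zero_add]
        push_cast
        split_ifs <;> omega
      · -- no 1 in x nor in its run: mAux just walks over the whole run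
        rw [if_neg (by tauto), hdrop]
        have hx1 : mAux 0 best (x :: xs) = mAux 0 best xs := by
          simp [mAux, if_neg h1]
        rw [hx1]
        conv_rhs => rw [← hsplit]
        have hpre : ∀ a ∈ xs.takeWhile (· == x), a ≠ 1 := by
          intro a ha
          have hax := List.mem_takeWhile_imp ha
          simp only [beq_iff_eq] at hax
          simpa [hax] using h1
        rw [mAux_skip _ _ best hpre]
termination_by l => l.length
decreasing_by
  have := List.length_drop (l := xs) (i := (xs.takeWhile (· == x)).length)
  simp only [List.length_cons]
  omega

-- mAux with a running best equals taking the max with the fresh value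
theorem mAux_best (l : List Int) (cur maxv : Int) (h0 : 0 ≤ cur) (h : cur ≤ maxv) :
    mAux cur maxv l = if mAux cur 0 l > maxv then mAux cur 0 l else maxv := by
  induction l generalizing cur maxv with
  | nil => simp only [mAux]; rw [if_neg (by omega)]
  | cons x xs ih =>
      simp only [mAux]
      by_cases h1 : x = 1
      · rw [if_pos h1, if_pos h1]
        have hge := mAux_ge xs (cur + 1) 0
        rw [ih (cur + 1) _ (by omega) (by split <;> omega)]
        rw [ih (cur + 1) (if cur + 1 > 0 then cur + 1 else 0) (by omega) (by split <;> omega)]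
        split_ifs <;> omega
      · rw [if_neg h1, if_neg h1]
        exact ih 0 maxv (le_refl 0) (by omega)

-- per-row bridge
theorem row_bridge (row : List Int) (best : Int) (h : 0 ≤ best) :
    pvBOuter row row.length 0 best
      = if longitudUnosMax row > best then longitudUnosMax row else best := by
  rw [pvBOuter_eq, List.drop_zero, bAux_eq_mAux row best h, longitudUnosMax_eq]
  exact mAux_best row 0 best (le_refl 0) h

theorem fold_bridge (L : List (List Int)) (best : Int) (h : 0 ≤ best) :
    L.foldl (fun m fila => if longitudUnosMax fila > m then longitudUnosMax fila else m) best
      = L.foldl (fun b row => pvBOuter row row.length 0 b) best := by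
  induction L generalizing best with
  | nil => rfl
  | cons r rs ih =>
      simp only [List.foldl_cons]
      rw [row_bridge r best h]
      exact ih _ (by split <;> omega)

-- ===== VERDICT (by name: the statement is the Claim_ definition above) =====
theorem longitud_mas_grande_spec : Claim_equal_longitud_mas_grande := by
  intro A _
  unfold Spec_longitud_mas_grande longitud_mas_grande longitud_mas_grande_alt
  exact fold_bridge A 0 (le_refl 0)
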